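-- pv_equiv track=rewrite | github.com/Joshuaschoonmaker7/Week-Four-Assignment | piggetty.py | piggy
-- ===== SOURCE A (Python) =====
-- def piggy(word):
--
-- 	# Magic Happens Here
-- 	#
-- # File Header
-- #
--
-- # Define vowels
--
-- 	vowels = "aeiouAEIOU"
--
-- # Ask for word
--
-- # Loop through word, one letter at a time
--
-- 	n = 0
-- 	endword = ""
--
-- 	for letter in word:
--
--
-- 		# Check if letter is a vowel
-- 		if letter in vowels:
--
-- 			if n == 0:
--
-- 			# True?  We are done
--
-- 				pig = word +  "yay"
--
-- 				return pig
--
-- 			else: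
-- 				pig = word[n:] + endword + "ay"
--
-- 				return pig
--
-- 				# False? Consonant
--
-- 		else:
-- 			endword = endword + word[n]
--
-- 			n = n + 1
-- ===== SOURCE B (Python) =====
-- def piggy(word):
--     vowels = "aeiouAEIOU"
--     i = next((j for j, c in enumerate(word) if c in vowels), None)
--     if i is None:
--         return None
--     if i == 0:
--         return word + "yay"
--     return word[i:] + word[:i] + "ay"
-- ===== Notes on version B (the rewrite author's own statement) =====
-- stated objective: simpler
-- what changed: B computes the first-vowel index once with a single generator scan and branches once on it, slicing word[:i] instead of accumulating a consonant prefix character by character inside the loop.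
import Mathlib
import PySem

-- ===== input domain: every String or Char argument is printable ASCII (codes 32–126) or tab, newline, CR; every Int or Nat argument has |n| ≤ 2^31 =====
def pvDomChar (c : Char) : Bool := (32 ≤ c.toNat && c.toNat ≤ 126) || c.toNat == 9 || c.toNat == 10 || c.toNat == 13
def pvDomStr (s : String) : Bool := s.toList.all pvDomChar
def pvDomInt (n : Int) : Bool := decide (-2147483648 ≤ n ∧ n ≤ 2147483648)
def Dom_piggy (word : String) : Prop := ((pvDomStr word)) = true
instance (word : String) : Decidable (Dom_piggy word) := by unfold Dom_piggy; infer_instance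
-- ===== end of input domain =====

-- B computes the first-vowel index once and branches once on it, slicing word[:i] instead of
-- accumulating a consonant prefix inside the loop (objective: simpler).


-- ===== PORT A =====
def pvVowels : List Char := "aeiouAEIOU".toList

-- the loop of A: iterates over the remaining characters, keeping the index n and the
-- accumulated consonant prefix endword; word[n:] is PySem slice, word[n] is pyGetD.
def piggyLoop (word : List Char) (rest : List Char) (n : Nat) (endword : List Char) :
    Option (List Char) :=
  match rest with
  | [] => none
  | letter :: rs =>
    if letter ∈ pvVowels then
      if n = 0 then
        some (word ++ "yay".toList)
      else
        some (PySem.List.slice word (some (n : Int)) none ++ endword ++ "ay".toList)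
    else
      piggyLoop word rs (n + 1) (endword ++ [PySem.List.pyGetD word (n : Int) letter])

def piggy (word : String) : Option String :=
  (piggyLoop word.toList word.toList 0 []).map String.ofList

-- ===== PORT B =====
def piggy_alt (word : String) : Option String :=
  match word.toList.findIdx? (fun c => c ∈ pvVowels) with
  | none => none
  | some i =>
    if i = 0 then
      some (String.ofList (word.toList ++ "yay".toList))
    else
      some (String.ofList (word.toList.drop i ++ word.toList.take i ++ "ay".toList))

-- ===== PRECONDITION & SPEC =====
def Spec_piggy (word : String) (out : Option String) : Prop := out = piggy_alt word
instance (word : String) (out : Option String) : Decidable (Spec_piggy word out) := by unfold Spec_piggy; infer_instance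

-- ===== CLAIM (what is proved, stated in full; the proofs are below) =====
def Claim_equal_piggy : Prop := ∀ (word : String), Dom_piggy word → Spec_piggy word (piggy word)

-- ===== LEMMAS AND PROOFS =====

-- loop invariant: when rest = w.drop n and endword = w.take n, the loop computes the
-- first-vowel-index branch of B, offset by n.
theorem piggyLoop_eq (w : List Char) (rest : List Char) (n : Nat)
    (hr : rest = w.drop n) (hn : n ≤ w.length) :
    piggyLoop w rest n (w.take n) =
      match rest.findIdx? (fun c => c ∈ pvVowels) with
      | none => none
      | some k =>
        if n + k = 0 then some (w ++ "yay".toList)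
        else some (w.drop (n + k) ++ w.take (n + k) ++ "ay".toList) := by
  induction rest generalizing n with
  | nil => simp [piggyLoop]
  | cons letter rs ih =>
    have hlt : n < w.length := by
      by_contra h
      have hnil : w.drop n = [] := List.drop_eq_nil_of_le (by omega)
      rw [hnil] at hr; simp at hr
    have hget : w[n] = letter := by
      have h0 : (w.drop n)[0]'(by rw [← hr]; simp) = letter := by
        simp only [← hr]; rfl
      simpa using h0
    by_cases hv : letter ∈ pvVowels
    · simp only [piggyLoop, if_pos hv, List.findIdx?_cons]
      have hvt : (fun c => decide (c ∈ pvVowels)) letter = true := by simpa using hv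
      simp only [hvt, if_true]
      by_cases hn0 : n = 0
      · subst hn0; simp
      · simp [hn0, PySem.List.slice_from_natCast]
    · simp only [piggyLoop, if_neg hv, List.findIdx?_cons]
      have hvb : (fun c => decide (c ∈ pvVowels)) letter = false := by simpa using hv
      simp only [hvb]
      have hget' : PySem.List.pyGetD w (n : Int) letter = letter := by
        rw [PySem.List.pyGetD_natCast, List.getD_eq_getElem _ _ hlt]; exact hget
      have htake : w.take n ++ [PySem.List.pyGetD w (n : Int) letter] = w.take (n + 1) := by
        rw [hget', ← hget, List.take_add_one, List.getElem?_eq_getElem hlt]; rfl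
      have hrs : rs = w.drop (n + 1) := by
        have : w.drop (n + 1) = (w.drop n).tail := by
          rw [← List.drop_drop]; simp
        rw [this, ← hr]; rfl
      rw [htake, ih (n + 1) hrs (by omega)]
      cases h : rs.findIdx? (fun c => c ∈ pvVowels) with
      | none => simp
      | some k =>
        simp only [Option.map_some]
        have : n + 1 + k = n + (k + 1) := by omega
        rw [this]
        have : ¬ n + (k + 1) = 0 := by omega
        simp

-- ===== VERDICT (by name: the statement is the Claim_ definition above) =====
theorem piggy_spec : Claim_equal_piggy := by
  intro word _
  unfold Spec_piggy piggy piggy_alt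
  have h := piggyLoop_eq word.toList word.toList 0 (by simp) (by simp)
  simp only [List.take_zero] at h
  rw [h]
  cases hk : word.toList.findIdx? (fun c => c ∈ pvVowels) with
  | none => rfl
  | some k =>
    by_cases hk0 : k = 0
    · subst hk0; simp
    · simp [hk0]
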